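-- pv_equiv track=rewrite | github.com/JBakers/pihole-sentinel | setup.py | escape_for_env_file
-- ===== SOURCE A (Python) =====
-- def escape_for_env_file(value):
--     """Escape value for safe use in .env file."""
--     if not value:
--         return ""
--     value_str = str(value)
--     # If value contains special chars, wrap in quotes and escape
--     if any(c in value_str for c in ['"', "'", ' ', '\n', '\r', '=', '#', '$', '`']):
--         escaped = value_str.replace('\\', '\\\\').replace('"', '\\"')
--         return f'"{escaped}"'
--     return value_str
-- ===== SOURCE B (Python) =====
-- def escape_for_env_file(value):
--     """Escape value for safe use in .env file."""
--     if not value: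
--         return ""
--     value_str = str(value)
--     specials = '"\' \n\r=#$`'
--     out = []
--     needs_quote = False
--     for c in value_str:
--         if c == '\\':
--             out.append('\\\\')
--         elif c == '"':
--             out.append('\\"')
--         else:
--             out.append(c)
--         if c in specials:
--             needs_quote = True
--     if needs_quote:
--         return '"' + ''.join(out) + '"'
--     return value_str
-- ===== Notes on version B (the rewrite author's own statement) =====
-- stated objective: alternative
-- what changed: Replaces the membership scan over nine special strings plus two whole-string .replace passes with one single-pass loop that escapes each character and records whether quoting is needed.
import Mathlib
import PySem

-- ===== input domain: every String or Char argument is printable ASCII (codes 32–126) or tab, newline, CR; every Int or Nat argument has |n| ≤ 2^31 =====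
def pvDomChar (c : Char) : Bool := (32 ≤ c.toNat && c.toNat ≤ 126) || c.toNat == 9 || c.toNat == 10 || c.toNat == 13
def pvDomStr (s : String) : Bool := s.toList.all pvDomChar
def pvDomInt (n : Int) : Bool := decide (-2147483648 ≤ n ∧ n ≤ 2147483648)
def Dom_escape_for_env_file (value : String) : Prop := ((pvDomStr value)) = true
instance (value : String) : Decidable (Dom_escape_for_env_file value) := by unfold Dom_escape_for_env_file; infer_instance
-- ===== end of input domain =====

-- B fuses A's nine-substring membership scan and two whole-string replace passes into one
-- character loop that escapes as it goes and records whether quoting is needed (objective: alternative).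


-- ===== PORT A =====
-- `str(value)` on a string is the identity; `not value` is `value == ""`.
def escape_for_env_file (value : String) : String :=
  if value == "" then ""
  else
    let value_str := value
    if ["\"", "'", " ", "\n", "\r", "=", "#", "$", "`"].any
        (fun c => PySem.Str.isIn c value_str) then
      let escaped := PySem.Str.replace (PySem.Str.replace value_str "\\" "\\\\") "\"" "\\\""
      "\"" ++ escaped ++ "\""
    else value_str

-- ===== PORT B =====
def escSpecials : List Char := ['"', '\'', ' ', '\n', '\r', '=', '#', '$', '`']

-- one loop step: append the escaped form of c, update the needs_quote flag
def escStep (st : List Char × Bool) (c : Char) : List Char × Bool :=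
  (st.1 ++ (if c == '\\' then ['\\', '\\'] else if c == '"' then ['\\', '"'] else [c]),
   st.2 || escSpecials.contains c)

def escape_for_env_file_alt (value : String) : String :=
  if value == "" then ""
  else
    let st := value.toList.foldl escStep ([], false)
    if st.2 then String.ofList ('"' :: st.1 ++ ['"']) else value

-- ===== PRECONDITION & SPEC =====
def Spec_escape_for_env_file (value : String) (out : String) : Prop := out = escape_for_env_file_alt value
instance (value : String) (out : String) : Decidable (Spec_escape_for_env_file value out) := by unfold Spec_escape_for_env_file; infer_instance

-- ===== CLAIM (what is proved, stated in full; the proofs are below) =====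
def Claim_equal_escape_for_env_file : Prop := ∀ (value : String), Dom_escape_for_env_file value → Spec_escape_for_env_file value (escape_for_env_file value)

-- ===== LEMMAS AND PROOFS =====

-- the per-character escape B performs
def escChar (c : Char) : List Char :=
  if c = '\\' then ['\\', '\\'] else if c = '"' then ['\\', '"'] else [c]

-- single-character replace is a flatMap
theorem replace_go_single (a : Char) (new : List Char) :
    ∀ (l acc : List Char) (fuel : Nat), l.length ≤ fuel →
      PySem.Chars.replace.go [a] new fuel l acc
        = acc.reverse ++ l.flatMap (fun c => if c = a then new else [c]) := by
  intro l
  induction l with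
  | nil =>
    intro acc fuel _
    cases fuel <;> simp [PySem.Chars.replace.go]
  | cons c t ih =>
    intro acc fuel hf
    cases fuel with
    | zero => simp at hf
    | succ f =>
      rw [PySem.Chars.replace.go]
      by_cases hc : c = a
      · subst hc
        simp [List.isPrefixOf, ih _ f (by simpa using hf)]
      · have hpre : [a].isPrefixOf (c :: t) = false := by
          simp [List.isPrefixOf]
          exact fun h => hc h.symm
        simp [hpre, ih _ f (by simpa using hf), hc]

theorem replace_single (a : Char) (new l : List Char) :
    PySem.Chars.replace l [a] new = l.flatMap (fun c => if c = a then new else [c]) := by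
  rw [PySem.Chars.replace]
  simp [replace_go_single a new l [] l.length le_rfl]

-- A's two replace passes compose into B's per-character escape
theorem replace_chain (l : List Char) :
    PySem.Chars.replace (PySem.Chars.replace l ['\\'] ['\\', '\\']) ['"'] ['\\', '"']
      = l.flatMap escChar := by
  rw [replace_single, replace_single, List.flatMap_assoc]
  refine List.flatMap_congr (fun c _ => ?_)
  by_cases h1 : c = '\\' <;> by_cases h2 : c = '"' <;>
    simp_all [escChar, List.flatMap]

-- B's fold characterised
theorem foldl_escStep (l : List Char) :
    ∀ (acc : List Char) (b : Bool),
      l.foldl escStep (acc, b)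
        = (acc ++ l.flatMap escChar, b || l.any (escSpecials.contains ·)) := by
  induction l with
  | nil => intro acc b; simp
  | cons c t ih =>
    intro acc b
    simp only [List.foldl_cons, escStep, ih, List.flatMap_cons, List.any_cons]
    refine congrArg₂ Prod.mk ?_ ?_
    · simp only [List.append_assoc, escChar]
      by_cases h1 : c = '\\' <;> by_cases h2 : c = '"' <;> simp_all
    · simp [Bool.or_assoc]

-- A's detection condition equals B's flag
theorem contains_or_eq_any (l : List Char) :
    (l.contains '"' || (l.contains '\'' || (l.contains ' ' || (l.contains '\n' ||
      (l.contains '\r' || (l.contains '=' || (l.contains '#' || (l.contains '$' ||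
      (l.contains '`' || false)))))))))
      = l.any (escSpecials.contains ·) := by
  rw [Bool.eq_iff_iff]
  simp only [Bool.or_eq_true, List.contains_iff_mem, List.any_eq_true, escSpecials,
    List.contains_cons, List.contains_nil, Bool.or_eq_true, beq_iff_eq, Bool.false_eq_true,
    or_false]
  constructor
  · rintro (h | h | h | h | h | h | h | h | h) <;> exact ⟨_, h, by simp⟩
  · rintro ⟨c, hc, h⟩
    rcases h with h | h | h | h | h | h | h | h | h <;> subst h <;> tauto

theorem detect_eq (s : String) :
    (["\"", "'", " ", "\n", "\r", "=", "#", "$", "`"].any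
        (fun c => PySem.Str.isIn c s))
      = s.toList.any (escSpecials.contains ·) := by
  have h : ∀ (sub : String) (a : Char), sub.toList = [a] →
      PySem.Str.isIn sub s = s.toList.contains a := by
    intro sub a ha
    rw [Bool.eq_iff_iff, PySem.Str.isIn_iff_infix, ha]
    simp [List.singleton_infix_iff]
  simp only [List.any_cons, List.any_nil]
  rw [h "\"" '"' rfl, h "'" '\'' rfl, h " " ' ' rfl, h "\n" '\n' rfl, h "\r" '\r' rfl,
      h "=" '=' rfl, h "#" '#' rfl, h "$" '$' rfl, h "`" '`' rfl]
  exact contains_or_eq_any s.toList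

-- ===== VERDICT (by name: the statement is the Claim_ definition above) =====
theorem escape_for_env_file_spec : Claim_equal_escape_for_env_file := by
  intro value _
  unfold Spec_escape_for_env_file escape_for_env_file escape_for_env_file_alt
  by_cases hempty : value = ""
  · simp [hempty]
  · have hne : (value == "") = false := by simpa using hempty
    simp only [hne, Bool.false_eq_true, if_false]
    rw [foldl_escStep, detect_eq]
    rcases hflag : value.toList.any (escSpecials.contains ·) with _ | _
    · simp
    · simp only [if_true, List.nil_append]
      have hesc : (PySem.Str.replace (PySem.Str.replace value "\\" "\\\\") "\"" "\\\"").toList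
          = value.toList.flatMap escChar := by
        rw [PySem.Str.toList_replace, PySem.Str.toList_replace]
        exact replace_chain value.toList
      apply String.ext
      simp only [String.toList_append]
      rw [hesc]
      simp [show ("\"" : String).toList = ['"'] from rfl]
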